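-- pv_equiv track=rewrite | github.com/relspas/english-words | siteswap_words.py | isValidSiteswap
-- ===== SOURCE A (Python) =====
-- def isValidSiteswap(s):
--     d = set()
--     n = len(s)
--     for i in range(n):
--         d.add((ord(s[i])+i)%n)
--     if len(d) == len(s):
--         return True
--     return False
-- ===== SOURCE B (Python) =====
-- def isValidSiteswap(s):
--     n = len(s)
--     if n == 0:
--         return True
--     vals = sorted((ord(c) + i) % n for i, c in enumerate(s))
--     return vals == list(range(n))
-- ===== Notes on version B (the rewrite author's own statement) =====
-- stated objective: alternative
-- what changed: Replaces the set-of-residues distinctness test with a sort-and-compare: since the n residues all lie in [0,n), they are distinct exactly when their sorted list equals list(range(n)).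
import Mathlib
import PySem

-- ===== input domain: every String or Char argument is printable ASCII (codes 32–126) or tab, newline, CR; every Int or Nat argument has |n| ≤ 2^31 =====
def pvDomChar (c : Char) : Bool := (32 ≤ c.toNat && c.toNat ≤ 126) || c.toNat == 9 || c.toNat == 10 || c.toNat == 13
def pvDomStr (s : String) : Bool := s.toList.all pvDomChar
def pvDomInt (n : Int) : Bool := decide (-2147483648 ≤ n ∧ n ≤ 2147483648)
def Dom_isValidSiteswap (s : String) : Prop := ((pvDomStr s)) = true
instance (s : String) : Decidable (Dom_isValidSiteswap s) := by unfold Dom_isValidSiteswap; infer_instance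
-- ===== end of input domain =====

-- B replaces A's set-distinctness test with sort-and-compare against range(n); alternative decomposition, not claimed faster.

-- ===== PORT A =====
def isValidSiteswap (s : String) : Bool :=
  let cs := s.toList
  let n : Int := (cs.length : Int)
  let d : PySem.Set Int :=
    (PySem.List.pyRange 0 n 1).foldl
      (fun d i => PySem.Set.add d (PySem.Int.mod (((PySem.List.pyGetD cs i ' ').toNat : Int) + i) n))
      PySem.Set.empty
  if PySem.Set.len d = (cs.length : Int) then true else false

-- ===== PORT B =====
def isValidSiteswap_alt (s : String) : Bool :=
  let cs := s.toList
  let n : Int := (cs.length : Int)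
  if n = 0 then true
  else
    let vals := PySem.List.sorted
      ((PySem.List.enumerate cs 0).map (fun p => PySem.Int.mod ((p.2.toNat : Int) + p.1) n))
      (fun x => x) false
    vals = PySem.List.pyRange 0 n 1

-- ===== PRECONDITION & SPEC =====
def Spec_isValidSiteswap (s : String) (out : Bool) : Prop := out = isValidSiteswap_alt s
instance (s : String) (out : Bool) : Decidable (Spec_isValidSiteswap s out) := by unfold Spec_isValidSiteswap; infer_instance

-- ===== CLAIM (what is proved, stated in full; the proofs are below) =====
def Claim_equal_isValidSiteswap : Prop := ∀ (s : String), Dom_isValidSiteswap s → Spec_isValidSiteswap s (isValidSiteswap s)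

-- ===== LEMMAS AND PROOFS =====
-- length of the dedup (Set.ofList) equals the length iff the list has no duplicates
theorem pv_ofList_length_eq_iff {α : Type} [BEq α] [LawfulBEq α] (xs : List α) :
    (PySem.Set.ofList xs).length = xs.length ↔ xs.Nodup := by
  induction xs using List.reverseRecOn with
  | nil => simp [PySem.Set.ofList_nil]
  | append_singleton xs x ih =>
    rw [PySem.Set.ofList_append_singleton, PySem.Set.add_eq_ite]
    have hiff : x ∈ PySem.Set.ofList xs ↔ x ∈ xs := PySem.Set.mem_ofList xs x
    have hle := PySem.Set.length_ofList_le (xs := xs)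
    rw [List.nodup_append]
    simp only [List.nodup_singleton, List.mem_singleton,
      List.length_append, List.length_singleton]
    by_cases hx : x ∈ xs
    · rw [if_pos (hiff.mpr hx)]
      constructor
      · intro h; omega
      · intro ⟨_, _, hd⟩; exact absurd rfl (hd x hx x rfl)
    · rw [if_neg (fun h => hx (hiff.mp h))]
      simp only [List.length_append, List.length_singleton]
      constructor
      · intro h
        exact ⟨ih.mp (by omega), trivial, fun a ha b hb he => hx (by subst hb; subst he; exact ha)⟩
      · intro ⟨h1, _, _⟩; have := ih.mpr h1; omega

-- a Nodup list whose members lie in a list of no greater length is a permutation of it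
theorem pv_perm_of_nodup_subset_length {α : Type} (xs ys : List α)
    (hnd : xs.Nodup) (hsub : ∀ a ∈ xs, a ∈ ys) (hlen : ys.length ≤ xs.length) :
    ys.Perm xs := by
  have hsp : xs.Subperm ys := List.subperm_of_subset hnd hsub
  exact (hsp.perm_of_length_le hlen).symm

-- ===== VERDICT (by name: the statement is the Claim_ definition above) =====
theorem isValidSiteswap_spec : Claim_equal_isValidSiteswap := by
  intro s _
  show isValidSiteswap s = isValidSiteswap_alt s
  simp only [isValidSiteswap, isValidSiteswap_alt]
  set cs := s.toList with hcs
  set n : Int := (cs.length : Int) with hn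
  by_cases h0 : n = 0
  · have hnil : cs = [] := List.length_eq_zero_iff.mp (by omega)
    simp [h0, hnil, PySem.Set.len, PySem.Set.empty, PySem.List.pyRange]
  · have hpos : 0 < n := by omega
    set g : Int → Int := fun i => PySem.Int.mod (((PySem.List.pyGetD cs i ' ').toNat : Int) + i) n with hg
    set vals : List Int := (PySem.List.pyRange 0 n 1).map g with hvals
    have hA : (PySem.List.pyRange 0 n 1).foldl
        (fun d i => PySem.Set.add d (PySem.Int.mod (((PySem.List.pyGetD cs i ' ').toNat : Int) + i) n))
        PySem.Set.empty = PySem.Set.ofList vals := by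
      rw [hvals, PySem.Set.ofList_eq_foldl, List.foldl_map]
      rfl
    have hB : (PySem.List.enumerate cs 0).map
        (fun p => PySem.Int.mod ((p.2.toNat : Int) + p.1) n) = vals := by
      rw [PySem.List.enumerate_eq_map_pyRange (d := ' '), List.map_map, hvals]
      simp only [PySem.List.len_eq, ← hn]
      rfl
    rw [hA, hB]
    have hlenvals : vals.length = cs.length := by
      rw [hvals, List.length_map, PySem.List.length_pyRange_one]
      omega
    have hmem : ∀ x ∈ vals, x ∈ PySem.List.pyRange 0 n 1 := by
      intro x hx
      rw [hvals] at hx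
      obtain ⟨i, _, rfl⟩ := List.mem_map.mp hx
      rw [PySem.List.mem_pyRange_one]
      rw [hg]
      beta_reduce
      rw [PySem.Int.mod_eq_emod_of_pos hpos]
      exact ⟨Int.emod_nonneg _ (by omega), Int.emod_lt_of_pos _ hpos⟩
    have hrlen : (PySem.List.pyRange 0 n 1).length = cs.length := by
      rw [PySem.List.length_pyRange_one]; omega
    by_cases hnd : vals.Nodup
    · have hperm : (PySem.List.pyRange 0 n 1).Perm vals :=
        pv_perm_of_nodup_subset_length vals _ hnd hmem (by omega)
      have hsorted : PySem.List.sorted vals (fun x => x) false = PySem.List.pyRange 0 n 1 :=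
        PySem.List.sorted_eq_of_perm_of_pairwise_lt _ _ _ hperm
          (PySem.List.pairwise_lt_pyRange_one 0 n)
      have hset : (PySem.Set.ofList vals).length = cs.length :=
        ((pv_ofList_length_eq_iff vals).mpr hnd).trans hlenvals
      simp only [PySem.Set.len, hsorted, if_neg h0]
      simp only [hset, hn]
      simp
    · have hset : (PySem.Set.ofList vals).length ≠ cs.length := by
        rw [← hlenvals]
        exact fun h => hnd ((pv_ofList_length_eq_iff vals).mp h)
      have hsorted : PySem.List.sorted vals (fun x => x) false ≠ PySem.List.pyRange 0 n 1 := by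
        intro h
        have hperm : (PySem.List.sorted vals (fun x => x) false).Perm vals :=
          PySem.List.sorted_perm vals _ false
        rw [h] at hperm
        exact hnd ((PySem.List.nodup_pyRange_one 0 n).perm hperm)
      simp [PySem.Set.len, hsorted, if_neg h0]
      omega
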